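-- pv_equiv track=rewrite | github.com/Veritable-Games/veritable-games-server | projects/veritable-games/resources/scripts/cleanup_pdf_artifacts.py | remove_inappropriate_indentation
-- ===== SOURCE A (Python) =====
-- def remove_inappropriate_indentation(content: str) -> str:
--     """Remove leading spaces that create unwanted code blocks
--
--     PDF conversion often preserves indentation that becomes code blocks in markdown.
--     We keep intentional code blocks (``` fenced) but remove accidental ones.
--     """
--     lines = content.split('\n')
--     cleaned_lines = []
--     in_fenced_code = False
--
--     for line in lines:
--         # Track fenced code blocks
--         if line.strip().startswith('```'):
--             in_fenced_code = not in_fenced_code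
--             cleaned_lines.append(line)
--             continue
--
--         # Keep fenced code blocks as-is
--         if in_fenced_code:
--             cleaned_lines.append(line)
--             continue
--
--         # Remove leading spaces from non-code lines (unless it's a list item)
--         stripped = line.lstrip()
--         if stripped and not stripped[0] in ['-', '*', '1', '2', '3', '4', '5', '6', '7', '8', '9']:
--             # Not a list item, remove indentation
--             cleaned_lines.append(stripped)
--         else:
--             # Keep list items with their indentation
--             cleaned_lines.append(line)
--
--     return '\n'.join(cleaned_lines)
-- ===== SOURCE B (Python) =====
-- def remove_inappropriate_indentation(content: str) -> str:
--     lines = content.split('\n')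
--     # pass 1: mark lines to keep verbatim (fence lines and fenced regions)
--     keep = []
--     fenced = False
--     for line in lines:
--         if line.strip().startswith('```'):
--             keep.append(True)
--             fenced = not fenced
--         else:
--             keep.append(fenced)
--     # pass 2: transform the unmarked lines
--     out = []
--     for line, k in zip(lines, keep):
--         if k:
--             out.append(line)
--         else:
--             s = line.lstrip()
--             out.append(line if (not s or s[0] in '-*123456789') else s)
--     return '\n'.join(out)
-- ===== Notes on version B (the rewrite author's own statement) =====
-- stated objective: alternative
-- what changed: Replaces A's single stateful loop (toggle flag + transform interleaved) by two separately-shaped passes: first build a boolean keep-verbatim mask for the lines, then zip lines with the mask and transform the unmarked ones.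
import Mathlib
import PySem

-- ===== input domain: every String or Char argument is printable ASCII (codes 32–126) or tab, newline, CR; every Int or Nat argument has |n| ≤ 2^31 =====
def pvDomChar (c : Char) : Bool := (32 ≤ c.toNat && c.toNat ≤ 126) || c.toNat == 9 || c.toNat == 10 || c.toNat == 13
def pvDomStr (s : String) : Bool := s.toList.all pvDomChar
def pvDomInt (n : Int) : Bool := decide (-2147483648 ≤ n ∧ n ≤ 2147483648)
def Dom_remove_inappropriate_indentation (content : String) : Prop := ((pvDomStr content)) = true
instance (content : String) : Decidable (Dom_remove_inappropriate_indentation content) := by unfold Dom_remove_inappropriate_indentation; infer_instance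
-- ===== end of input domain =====

-- B replaces A's single stateful loop by two passes (mark fence-protected lines, then transform);
-- objective: alternative decomposition, same cost.

-- ===== PORT A =====
def pvMarkers : List Char := ['-', '*', '1', '2', '3', '4', '5', '6', '7', '8', '9']

-- A's single loop: state = (in_fenced_code, cleaned_lines accumulator)
def pvLoopA : List (List Char) → Bool → List (List Char) → List (List Char)
  | [], _, acc => acc
  | l :: rest, fenced, acc =>
    if PySem.Chars.startswith (PySem.Chars.strip l) ['`', '`', '`'] then
      pvLoopA rest (!fenced) (acc ++ [l])
    else if fenced then
      pvLoopA rest fenced (acc ++ [l])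
    else
      let s := PySem.Chars.lstrip l
      match s with
      | [] => pvLoopA rest fenced (acc ++ [l])          -- 'if stripped' false
      | c :: _ =>
        if pvMarkers.contains c then pvLoopA rest fenced (acc ++ [l])   -- list item
        else pvLoopA rest fenced (acc ++ [s])

def remove_inappropriate_indentation (content : String) : String :=
  String.mk (PySem.Chars.join ['\n'] (pvLoopA (PySem.Chars.splitOn content.toList ['\n']) false []))

-- ===== PORT B =====
-- pass 1: mark lines kept verbatim (fence lines and fenced regions)
def pvMaskB : List (List Char) → Bool → List Bool
  | [], _ => []
  | l :: rest, fenced =>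
    if PySem.Chars.startswith (PySem.Chars.strip l) ['`', '`', '`'] then
      true :: pvMaskB rest (!fenced)
    else
      fenced :: pvMaskB rest fenced

-- pass 2: transform one line/flag pair
def pvEmitB (l : List Char) (k : Bool) : List Char :=
  if k then l
  else
    match PySem.Chars.lstrip l with
    | [] => l
    | c :: cs => if pvMarkers.contains c then l else c :: cs

def remove_inappropriate_indentation_alt (content : String) : String :=
  let lines := PySem.Chars.splitOn content.toList ['\n']
  String.mk (PySem.Chars.join ['\n'] (List.zipWith pvEmitB lines (pvMaskB lines false)))

-- ===== PRECONDITION & SPEC =====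
def Spec_remove_inappropriate_indentation (content : String) (out : String) : Prop := out = remove_inappropriate_indentation_alt content
instance (content : String) (out : String) : Decidable (Spec_remove_inappropriate_indentation content out) := by unfold Spec_remove_inappropriate_indentation; infer_instance

-- ===== CLAIM (what is proved, stated in full; the proofs are below) =====
def Claim_equal_remove_inappropriate_indentation : Prop := ∀ (content : String), Dom_remove_inappropriate_indentation content → Spec_remove_inappropriate_indentation content (remove_inappropriate_indentation content)

-- ===== LEMMAS AND PROOFS =====
theorem pvLoopA_eq_zipWith (lines : List (List Char)) : ∀ (fenced : Bool) (acc : List (List Char)),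
    pvLoopA lines fenced acc = acc ++ List.zipWith pvEmitB lines (pvMaskB lines fenced) := by
  induction lines with
  | nil => intro fenced acc; simp [pvLoopA, pvMaskB]
  | cons l rest ih =>
    intro fenced acc
    by_cases hf : PySem.Chars.startswith (PySem.Chars.strip l) ['`', '`', '`'] = true
    · simp [pvLoopA, pvMaskB, hf, ih, pvEmitB]
    · cases fenced with
      | true => simp [pvLoopA, pvMaskB, hf, ih, pvEmitB]
      | false =>
        simp only [pvLoopA, pvMaskB, hf, if_false, Bool.false_eq_true,
          List.zipWith_cons_cons]
        cases hs : PySem.Chars.lstrip l with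
        | nil => simp [ih, pvEmitB, hs]
        | cons c cs =>
          by_cases hm : c ∈ pvMarkers <;> simp [ih, pvEmitB, hs, hm]

-- ===== VERDICT (by name: the statement is the Claim_ definition above) =====
theorem remove_inappropriate_indentation_spec : Claim_equal_remove_inappropriate_indentation := by
  intro content _
  unfold Spec_remove_inappropriate_indentation remove_inappropriate_indentation
    remove_inappropriate_indentation_alt
  rw [pvLoopA_eq_zipWith]
  simp
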